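-- pv_equiv track=rewrite | github.com/o2alexanderfedin/hupyy-temporal | tests/generate_report.py | categorize_by_path
-- ===== SOURCE A (Python) =====
-- from typing import List, Dict, Any
--
-- def categorize_by_path(file_path: str) -> Dict[str, str]:
--     """Extract categories from file path."""
--     parts = file_path.split('/')
--
--     priority = None
--     logic_type = None
--     expected = None
--
--     for part in parts:
--         if part.startswith('P') and '-' in part:
--             priority = part
--         elif part in ['lia', 'temporal', 'quantifier', 'rbac', 'mixed', 'scale']:
--             logic_type = part
--         elif part in ['sat', 'unsat', 'unknown']:
--             expected = part
--
--     return {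
--         'priority': priority or 'unknown',
--         'logic_type': logic_type or 'unknown',
--         'expected': expected
--     }
-- ===== SOURCE B (Python) =====
-- LOGIC_TYPES = {'lia', 'temporal', 'quantifier', 'rbac', 'mixed', 'scale'}
-- EXPECTED = {'sat', 'unsat', 'unknown'}
--
-- def _last_match(parts, pred):
--     """Last element of parts satisfying pred, or None."""
--     return next((p for p in reversed(parts) if pred(p)), None)
--
-- def categorize_by_path(file_path: str):
--     """Extract categories from file path (three independent last-match scans)."""
--     parts = file_path.split('/')
--     priority = _last_match(parts, lambda p: p.startswith('P') and '-' in p)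
--     logic_type = _last_match(parts, lambda p: p in LOGIC_TYPES)
--     expected = _last_match(parts, lambda p: p in EXPECTED)
--     return {
--         'priority': priority or 'unknown',
--         'logic_type': logic_type or 'unknown',
--         'expected': expected,
--     }
-- ===== Notes on version B (the rewrite author's own statement) =====
-- stated objective: simpler
-- what changed: Replaced A's single stateful elif-chain loop over all parts with three independent last-match scans (one per category) assembled at the end.
import Mathlib
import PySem

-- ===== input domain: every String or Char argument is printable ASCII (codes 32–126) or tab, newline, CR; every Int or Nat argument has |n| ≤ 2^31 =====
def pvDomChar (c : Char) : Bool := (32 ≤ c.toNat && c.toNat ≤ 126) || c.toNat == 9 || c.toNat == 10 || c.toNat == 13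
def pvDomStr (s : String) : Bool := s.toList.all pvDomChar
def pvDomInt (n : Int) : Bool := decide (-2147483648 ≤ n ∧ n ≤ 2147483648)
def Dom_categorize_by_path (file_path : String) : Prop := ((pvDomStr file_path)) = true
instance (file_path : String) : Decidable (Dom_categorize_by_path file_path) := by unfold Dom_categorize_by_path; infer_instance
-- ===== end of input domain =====

-- B replaces A's single stateful elif-loop by three independent last-match scans; objective: simpler decomposition.

-- ===== PORT A =====
-- Python truthiness of `s or d` for a string option: None or "" fall back to d.
def pyOrStr (o : Option String) (d : String) : String :=
  match o with
  | none => d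
  | some s => if s.toList.isEmpty then d else s

def catPriority (part : String) : Bool :=
  PySem.Str.startswith part "P" && PySem.Str.isIn "-" part

def catLogic (part : String) : Bool :=
  ["lia", "temporal", "quantifier", "rbac", "mixed", "scale"].contains part

def catExpected (part : String) : Bool :=
  ["sat", "unsat", "unknown"].contains part

-- A's loop body: elif chain updating the triple (priority, logic_type, expected).
def catStep (s : Option String × Option String × Option String) (part : String) :
    Option String × Option String × Option String :=
  if catPriority part then (some part, s.2.1, s.2.2)
  else if catLogic part then (s.1, some part, s.2.2)
  else if catExpected part then (s.1, s.2.1, some part)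
  else s

def categorize_by_path (file_path : String) : List (String × Option String) :=
  let parts := (PySem.Str.split? file_path "/").getD []
  let s := parts.foldl catStep (none, none, none)
  [("priority", some (pyOrStr s.1 "unknown")),
   ("logic_type", some (pyOrStr s.2.1 "unknown")),
   ("expected", s.2.2)]

-- ===== PORT B =====
-- last element of parts satisfying pred, or none (Source B's reversed-iterator `next`)
def lastMatch (parts : List String) (pred : String → Bool) : Option String :=
  parts.reverse.find? pred

def categorize_by_path_alt (file_path : String) : List (String × Option String) :=
  let parts := (PySem.Str.split? file_path "/").getD []
  let priority := lastMatch parts catPriority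
  let logic_type := lastMatch parts catLogic
  let expected := lastMatch parts catExpected
  [("priority", some (pyOrStr priority "unknown")),
   ("logic_type", some (pyOrStr logic_type "unknown")),
   ("expected", expected)]

-- ===== PRECONDITION & SPEC =====
def Spec_categorize_by_path (file_path : String) (out : List (String × Option String)) : Prop := out = categorize_by_path_alt file_path
instance (file_path : String) (out : List (String × Option String)) : Decidable (Spec_categorize_by_path file_path out) := by unfold Spec_categorize_by_path; infer_instance

-- ===== CLAIM (what is proved, stated in full; the proofs are below) =====
def Claim_equal_categorize_by_path : Prop := ∀ (file_path : String), Dom_categorize_by_path file_path → Spec_categorize_by_path file_path (categorize_by_path file_path)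

-- ===== LEMMAS AND PROOFS =====

-- The three category predicates are pairwise exclusive (logic/expected names are lowercase,
-- so they never start with 'P', and the two word lists are disjoint).
lemma catLogic_not_priority (s : String) (h : catLogic s = true) : catPriority s = false := by
  simp only [catLogic, List.contains_cons, List.contains_nil] at h
  have : s = "lia" ∨ s = "temporal" ∨ s = "quantifier" ∨ s = "rbac" ∨ s = "mixed" ∨ s = "scale" := by
    simpa [beq_iff_eq, or_assoc] using h
  rcases this with h | h | h | h | h | h <;> subst h <;> decide

lemma catExpected_not_priority (s : String) (h : catExpected s = true) : catPriority s = false := by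
  have : s = "sat" ∨ s = "unsat" ∨ s = "unknown" := by
    simpa [catExpected, beq_iff_eq, or_assoc] using h
  rcases this with h | h | h <;> subst h <;> decide

lemma catExpected_not_logic (s : String) (h : catExpected s = true) : catLogic s = false := by
  have : s = "sat" ∨ s = "unsat" ∨ s = "unknown" := by
    simpa [catExpected, beq_iff_eq, or_assoc] using h
  rcases this with h | h | h <;> subst h <;> decide

-- Loop invariant: A's fold computes, in each slot, the last match or the incoming value.
lemma catStep_foldl (l : List String) (s : Option String × Option String × Option String) :
    l.foldl catStep s =
      ((l.reverse.find? catPriority).or s.1,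
       (l.reverse.find? catLogic).or s.2.1,
       (l.reverse.find? catExpected).or s.2.2) := by
  induction l generalizing s with
  | nil => simp
  | cons x xs ih =>
    show (xs.foldl catStep (catStep s x)) = _
    rw [ih]
    have hrev : (x :: xs).reverse = xs.reverse ++ [x] := by simp
    rw [hrev]
    simp only [List.find?_append, List.find?_cons, List.find?_nil]
    unfold catStep
    by_cases h1 : catPriority x
    · have h2 : catLogic x = false := by
        by_contra hc; simp only [Bool.not_eq_false] at hc
        exact absurd h1 (by simp [catLogic_not_priority x hc])
      have h3 : catExpected x = false := by
        by_contra hc; simp only [Bool.not_eq_false] at hc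
        exact absurd h1 (by simp [catExpected_not_priority x hc])
      simp [h1, h2, h3]
    · by_cases h2 : catLogic x
      · have h3 : catExpected x = false := by
          by_contra hc; simp only [Bool.not_eq_false] at hc
          exact absurd h2 (by simp [catExpected_not_logic x hc])
        simp [h1, h2, h3]
      · by_cases h3 : catExpected x
        · simp [h1, h2, h3]
        · simp [h1, h2, h3]

-- ===== VERDICT (by name: the statement is the Claim_ definition above) =====
theorem categorize_by_path_spec : Claim_equal_categorize_by_path := by
  intro file_path _
  unfold Spec_categorize_by_path categorize_by_path categorize_by_path_alt lastMatch
  simp only [catStep_foldl, Option.or_none]
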